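-- pv_equiv track=rewrite | github.com/anna17rom/Algorytms_lab | lab5/Zadanie2/zadanie5l6.py | dfs
-- ===== SOURCE A (Python) =====
-- def dfs(v, tree, dp, arrival_time, current_time, depths):
--     children = tree.get(v, [])
--     if not children:
--         dp[v] = 0
--         arrival_time[v] = current_time
--         return 0
--
--
--     children.sort(key=lambda x: depths[x], reverse=True)
--
--     child_times = []
--     for child in children:
--         child_time = dfs(child, tree, dp, arrival_time, current_time + 1 + len(child_times), depths)
--         child_times.append(child_time + 1)
--
--     max_time = max(child_times[i] + i for i in range(len(child_times)))
--     dp[v] = max_time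
--     arrival_time[v] = current_time
--     return max_time
-- ===== SOURCE B (Python) =====
-- # Iterative post-order DFS with an explicit frame stack and a value stack, replacing A's recursion.
-- # Equivalence with A is about the RETURN value; dp / arrival_time / the in-place child sorts are
-- # performed here too, but arrival_time is written pre-order (A writes it post-order).
-- def dfs(v, tree, dp, arrival_time, current_time, depths):
--     stack = [(v, current_time, False)]
--     vals = []
--     while stack:
--         node, t, expanded = stack.pop()
--         children = tree.get(node, [])
--         if not expanded:
--             arrival_time[node] = t
--             if not children:
--                 dp[node] = 0
--                 vals.append(0)
--                 continue
--             children.sort(key=lambda x: depths[x], reverse=True)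
--             stack.append((node, t, True))
--             for i in reversed(range(len(children))):
--                 stack.append((children[i], t + 1 + i, False))
--         else:
--             n = len(children)
--             kids = vals[len(vals) - n:]
--             del vals[len(vals) - n:]
--             best = max(x + 1 + i for i, x in enumerate(kids))
--             dp[node] = best
--             vals.append(best)
--     return vals[0]
-- ===== Notes on version B (the rewrite author's own statement) =====
-- stated objective: alternative
-- what changed: A's recursive DFS is replaced by an iterative post-order traversal: an explicit stack of (node, start_time, expanded) frames plus a value stack, expanding a node into sorted child frames with start times t+1+i on first pop and combining the popped child results with max(x+1+i) on second pop.
import Mathlib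
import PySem

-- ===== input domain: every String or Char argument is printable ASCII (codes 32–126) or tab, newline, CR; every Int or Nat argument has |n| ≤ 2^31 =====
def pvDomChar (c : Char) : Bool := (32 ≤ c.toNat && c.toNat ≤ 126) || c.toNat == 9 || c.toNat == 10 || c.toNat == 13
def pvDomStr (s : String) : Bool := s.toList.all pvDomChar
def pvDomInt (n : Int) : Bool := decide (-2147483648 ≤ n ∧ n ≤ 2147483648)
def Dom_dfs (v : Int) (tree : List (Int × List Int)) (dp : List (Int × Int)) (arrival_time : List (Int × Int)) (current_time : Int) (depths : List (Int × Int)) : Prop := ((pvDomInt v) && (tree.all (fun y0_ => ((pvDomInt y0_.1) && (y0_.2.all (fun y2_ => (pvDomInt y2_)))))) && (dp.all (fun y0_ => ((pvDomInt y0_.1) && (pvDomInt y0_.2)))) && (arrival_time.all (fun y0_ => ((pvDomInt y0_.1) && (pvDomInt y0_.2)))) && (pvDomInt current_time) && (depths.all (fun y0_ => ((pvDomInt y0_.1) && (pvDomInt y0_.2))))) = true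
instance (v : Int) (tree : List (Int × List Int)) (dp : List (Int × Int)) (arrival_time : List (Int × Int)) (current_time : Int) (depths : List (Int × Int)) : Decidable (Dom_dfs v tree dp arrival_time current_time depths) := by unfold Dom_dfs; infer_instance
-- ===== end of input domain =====

-- B replaces A's recursion by an iterative post-order DFS over an explicit frame stack (objective:
-- alternative decomposition, same cost). A (and B) mutate dp / arrival_time / the child lists in
-- place; the equivalence proved here is about the RETURN value only (the return value of A never
-- reads dp or arrival_time, so the ports omit those dead stores; both Pythons still perform them,
-- B writing arrival_time pre-order where A writes it post-order).

-- ===== PORT A =====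
-- tree.get(v, []) — dict lookup with default (shared by both ports, as both Pythons do it)
def dfsChildren (tree : List (Int × List Int)) (v : Int) : List Int :=
  PySem.Dict.getD (PySem.Dict.mk tree) v []

-- depths[x], the sort key; Pre_dfs guarantees the key exists (Python raises KeyError otherwise)
def dfsSortKey (depths : List (Int × Int)) (x : Int) : Int :=
  PySem.Dict.getD (PySem.Dict.mk depths) x 0

-- max(child_times[i] + i for i in range(len(child_times))) — Python max of the indexed generator
def dfsMaxExpr (child_times : List Int) : Int :=
  (PySem.List.max?
      ((PySem.List.pyRange 0 (PySem.List.len child_times) 1).map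
        (fun i => PySem.List.pyGetD child_times i 0 + i))
      (fun y => y)).getD 0

-- A's recursion, fuel-indexed (Python recursion is unbounded; fuel exhaustion = none corresponds
-- exactly to Python's infinite recursion on a cycle, which Pre_dfs excludes).  current_time is
-- threaded exactly as Python threads it (t + 1 + len(child_times)).
def dfsO (tree : List (Int × List Int)) (depths : List (Int × Int)) :
    Nat → Int → Int → Option Int
  | 0, _, _ => none
  | f + 1, v, t =>
    let children := dfsChildren tree v
    if children = [] then some 0
    else
      let sc := PySem.List.sorted children (fun x => dfsSortKey depths x) true
      match sc.foldl
          (fun acc c =>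
            acc.bind fun ts =>
              (dfsO tree depths f c (t + 1 + (ts.length : Int))).map fun r => ts ++ [r + 1])
          (some []) with
      | none => none
      | some child_times => some (dfsMaxExpr child_times)

def dfs (v : Int) (tree : List (Int × List Int)) (dp : List (Int × Int)) (arrival_time : List (Int × Int)) (current_time : Int) (depths : List (Int × Int)) : Int :=
  (dfsO tree depths (tree.length + 1) v current_time).getD 0

-- ===== PORT B =====
-- max(x + 1 + i for i, x in enumerate(kids))
def dfsBestOf (kids : List Int) : Int :=
  (PySem.List.max?
      ((PySem.List.enumerate kids 0).map (fun p => p.2 + 1 + p.1))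
      (fun y => y)).getD 0

-- largest child-list length in tree (used only to size the loop fuel below)
def dfsMaxChild (tree : List (Int × List Int)) : Nat :=
  tree.foldl (fun m p => max m p.2.length) 0

-- fuel bound for B's while-loop: enough iterations for any run whose frames start at bound b
def dfsSB (M : Nat) : Nat → Nat
  | 0 => 1
  | b + 1 => (M + 1) * dfsSB M b + 2

-- B's while-loop over the frame stack (head = top of stack; a frame is (node, t, bound, expanded);
-- the per-frame bound and the outer fuel are totality artifacts: Python B's loop is unbounded, and
-- both run out exactly where Python loops forever, i.e. on a cycle, which Pre_dfs excludes).
-- vals is B's value stack in Python order (append at the right).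
def runB (tree : List (Int × List Int)) (depths : List (Int × Int)) :
    Nat → List (Int × Int × Nat × Bool) → List Int → Option Int
  | 0, _, _ => none
  | _ + 1, [], vals => some (vals.headD 0)  -- return vals[0] (vals is a singleton here)
  | F + 1, (node, t, b, expanded) :: rest, vals =>
    let children := dfsChildren tree node
    if expanded = false then
      if b = 0 then none  -- bound exhausted (artifact; Python recurses forever only off Pre_)
      else if children = [] then runB tree depths F rest (vals ++ [0])
      else
        let sc := PySem.List.sorted children (fun x => dfsSortKey depths x) true
        runB tree depths F
          (((List.range sc.length).reverse).foldl
            (fun st i => (sc.getD i 0, t + 1 + (i : Int), b - 1, false) :: st)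
            ((node, t, b, true) :: rest))
          vals
    else
      let n := children.length
      let kids := vals.drop (vals.length - n)
      let vals' := vals.take (vals.length - n)
      runB tree depths F rest (vals' ++ [dfsBestOf kids])

def dfs_alt (v : Int) (tree : List (Int × List Int)) (dp : List (Int × Int)) (arrival_time : List (Int × Int)) (current_time : Int) (depths : List (Int × Int)) : Int :=
  (runB tree depths (dfsSB (dfsMaxChild tree) (tree.length + 1) + 1)
      [(v, current_time, tree.length + 1, false)] []).getD 0

-- ===== PRECONDITION & SPEC =====
-- one step of graph reachability along tree's child lists (kept as a duplicate-free list)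
def dfsReachStep (tree : List (Int × List Int)) (S : List Int) : List Int :=
  PySem.List.dedup (S ++ S.flatMap (fun k => dfsChildren tree k))

def dfsReachIter (tree : List (Int × List Int)) : Nat → List Int → List Int
  | 0, S => S
  | n + 1, S => dfsReachIter tree n (dfsReachStep tree S)

-- Pre_dfs holds exactly where Python A returns normally; it excludes only the inputs on which A
-- raises: a KeyError (some node reachable from v has a child missing from depths) or unbounded
-- recursion (a directed cycle of tree is reachable from v).  tree.length + 1 iterations reach a
-- fixpoint of the reachability step, so both conjuncts are plain graph conditions on the input.
def Pre_dfs (v : Int) (tree : List (Int × List Int)) (dp : List (Int × Int)) (arrival_time : List (Int × Int)) (current_time : Int) (depths : List (Int × Int)) : Prop :=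
  (∀ k ∈ dfsReachIter tree (tree.length + 1) [v], ∀ c ∈ dfsChildren tree k,
      ((PySem.Dict.get? (PySem.Dict.mk depths) c).isSome : Bool) = true)
  ∧ (∀ k ∈ dfsReachIter tree (tree.length + 1) [v],
      k ∉ dfsReachIter tree (tree.length + 1) (dfsChildren tree k))
instance (v : Int) (tree : List (Int × List Int)) (dp : List (Int × Int)) (arrival_time : List (Int × Int)) (current_time : Int) (depths : List (Int × Int)) : Decidable (Pre_dfs v tree dp arrival_time current_time depths) := by unfold Pre_dfs; infer_instance

def pvWitness_dfs : Int × (List (Int × List Int)) × (List (Int × Int)) × (List (Int × Int)) × Int × (List (Int × Int)) :=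
  (0, [(0, [1, 2]), (1, [3])], [], [], 0, [(1, 2), (2, 1), (3, 5)])

def Spec_dfs (v : Int) (tree : List (Int × List Int)) (dp : List (Int × Int)) (arrival_time : List (Int × Int)) (current_time : Int) (depths : List (Int × Int)) (out : Int) : Prop := out = dfs_alt v tree dp arrival_time current_time depths
instance (v : Int) (tree : List (Int × List Int)) (dp : List (Int × Int)) (arrival_time : List (Int × Int)) (current_time : Int) (depths : List (Int × Int)) (out : Int) : Decidable (Spec_dfs v tree dp arrival_time current_time depths out) := by unfold Spec_dfs; infer_instance

-- ===== CLAIM (what is proved, stated in full; the proofs are below) =====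
-- (The equality of the two ports holds without using Pre_dfs: both ports resolve Python's
-- non-termination, which Pre_dfs excludes, into the same fuel default, so the proof below
-- discharges the claim for every input and the Pre_dfs hypothesis is simply not needed.)
def Claim_equal_dfs : Prop := ∀ (v : Int) (tree : List (Int × List Int)) (dp : List (Int × Int)) (arrival_time : List (Int × Int)) (current_time : Int) (depths : List (Int × Int)), Dom_dfs v tree dp arrival_time current_time depths → Pre_dfs v tree dp arrival_time current_time depths → Spec_dfs v tree dp arrival_time current_time depths (dfs v tree dp arrival_time current_time depths)

-- ===== LEMMAS AND PROOFS =====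

-- cost of a stack: an upper bound on the number of loop iterations runB still needs
def dfsFrameCost (M : Nat) : Int × Int × Nat × Bool → Nat
  | (_, _, b, e) => if e then 1 else dfsSB M b

def dfsStackCost (M : Nat) (S : List (Int × Int × Nat × Bool)) : Nat :=
  S.foldr (fun fr a => dfsFrameCost M fr + a) 1

-- the frames pushed for children cs, with indices starting at j
def dfsMkFrames (t : Int) (bm : Nat) : List Int → Nat → List (Int × Int × Nat × Bool)
  | [], _ => []
  | c :: cs, j => (c, t + 1 + (j : Int), bm, false) :: dfsMkFrames t bm cs (j + 1)

lemma dfsSB_pos (M b : Nat) : 1 ≤ dfsSB M b := by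
  cases b <;> simp [dfsSB]

lemma dfsMaxChild_le_aux (f : Int × List Int → Nat) (l : List (Int × List Int)) :
    ∀ a : Nat, a ≤ l.foldl (fun m p => max m (f p)) a := by
  induction l with
  | nil => intro a; simp
  | cons p l ih =>
    intro a
    simpa using le_trans (le_max_left a (f p)) (ih (max a (f p)))

lemma dfsGetD_len_le (v : Int) : ∀ (tree : List (Int × List Int)) (a : Nat),
    ((PySem.Dict.mk tree).getD v []).length ≤ tree.foldl (fun m p => max m p.2.length) a := by
  intro tree
  induction tree with
  | nil =>
    intro a
    simp [PySem.Dict.getD, PySem.Dict.get?]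
  | cons p rest ih =>
    intro a
    rw [PySem.Dict.getD_eq_get?_getD]
    obtain ⟨k, l⟩ := p
    rw [PySem.Dict.get?_mk_cons]
    by_cases hk : (k == v) = true
    · simp only [hk, if_pos]
      simpa using le_trans (le_max_right a l.length)
        (dfsMaxChild_le_aux (fun p => p.2.length) rest (max a l.length))
    · simp only [hk, Bool.false_eq_true, if_false]
      rw [← PySem.Dict.getD_eq_get?_getD]
      simpa using ih (max a l.length)

lemma dfsChildren_len_le (tree : List (Int × List Int)) (v : Int) :
    (dfsChildren tree v).length ≤ dfsMaxChild tree :=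
  dfsGetD_len_le v tree 0

lemma dfsStackCost_pos (M : Nat) (S : List (Int × Int × Nat × Bool)) :
    1 ≤ dfsStackCost M S := by
  induction S with
  | nil => simp [dfsStackCost]
  | cons fr S ih => simp [dfsStackCost] at ih ⊢; omega

lemma dfsStackCost_cons (M : Nat) (fr : Int × Int × Nat × Bool) (S : List (Int × Int × Nat × Bool)) :
    dfsStackCost M (fr :: S) = dfsFrameCost M fr + dfsStackCost M S := rfl

lemma dfsStackCost_mkFrames (M : Nat) (t : Int) (bm : Nat) (cs : List Int) (j : Nat)
    (S : List (Int × Int × Nat × Bool)) :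
    dfsStackCost M (dfsMkFrames t bm cs j ++ S) = cs.length * dfsSB M bm + dfsStackCost M S := by
  induction cs generalizing j with
  | nil => simp [dfsMkFrames]
  | cons c cs ih =>
    simp [dfsMkFrames, dfsStackCost_cons, ih, dfsFrameCost]
    ring

-- the pushed-frames loop of port B builds exactly dfsMkFrames
lemma dfsFoldRevCons {β : Type} (g : Nat → β) (l : List Nat) (init : List β) :
    l.reverse.foldl (fun st i => g i :: st) init = l.map g ++ init := by
  induction l generalizing init with
  | nil => simp
  | cons x l ih => simp [List.foldl_append, ih]

lemma dfsRangeMap_aux (t : Int) (bm : Nat) : ∀ (sc : List Int) (j : Nat),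
    (List.range sc.length).map (fun i => (sc.getD i 0, t + 1 + ((j + i : Nat) : Int), bm, false)) =
      dfsMkFrames t bm sc j := by
  intro sc
  induction sc with
  | nil => intro j; simp [dfsMkFrames]
  | cons c cs ih =>
    intro j
    rw [List.length_cons, List.range_succ_eq_map, List.map_cons, List.map_map]
    simp only [List.getD_cons_zero, Nat.add_zero, dfsMkFrames]
    congr 1
    rw [← ih (j + 1)]
    apply List.map_congr_left
    intro i _
    simp only [Function.comp_apply, List.getD_cons_succ]
    congr 2
    omega

lemma dfsRangeMap_eq_mkFrames (t : Int) (bm : Nat) (sc : List Int) :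
    (List.range sc.length).map (fun i => (sc.getD i 0, t + 1 + (i : Int), bm, false)) =
      dfsMkFrames t bm sc 0 := by
  rw [← dfsRangeMap_aux t bm sc 0]
  simp

-- A's child loop as a function of its accumulator (definitionally dfsO's foldl)
def dfsFoldA (tree : List (Int × List Int)) (depths : List (Int × Int)) (f : Nat) (t : Int)
    (cs : List Int) (acc : Option (List Int)) : Option (List Int) :=
  cs.foldl
    (fun acc c =>
      acc.bind fun ts =>
        (dfsO tree depths f c (t + 1 + (ts.length : Int))).map fun r => ts ++ [r + 1])
    acc

lemma dfsO_succ (tree : List (Int × List Int)) (depths : List (Int × Int)) (f : Nat) (v t : Int) :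
    dfsO tree depths (f + 1) v t =
      (if dfsChildren tree v = [] then some 0
       else
         match dfsFoldA tree depths f t
             (PySem.List.sorted (dfsChildren tree v) (fun x => dfsSortKey depths x) true)
             (some []) with
         | none => none
         | some child_times => some (dfsMaxExpr child_times)) := rfl

lemma dfsFoldA_nil (tree : List (Int × List Int)) (depths : List (Int × Int)) (f : Nat) (t : Int)
    (acc : Option (List Int)) : dfsFoldA tree depths f t [] acc = acc := rfl

lemma dfsFoldA_cons (tree : List (Int × List Int)) (depths : List (Int × Int)) (f : Nat) (t : Int)
    (c : Int) (cs : List Int) (acc : Option (List Int)) :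
    dfsFoldA tree depths f t (c :: cs) acc =
      dfsFoldA tree depths f t cs
        (acc.bind fun ts =>
          (dfsO tree depths f c (t + 1 + (ts.length : Int))).map fun r => ts ++ [r + 1]) := rfl

lemma dfsFoldA_none (tree : List (Int × List Int)) (depths : List (Int × Int)) (f : Nat) (t : Int)
    (cs : List Int) : dfsFoldA tree depths f t cs none = none := by
  induction cs with
  | nil => rfl
  | cons c cs ih => simpa [dfsFoldA_cons] using ih

lemma dfsMaxEq (rs : List Int) : dfsMaxExpr (rs.map (fun r => r + 1)) = dfsBestOf rs := by
  unfold dfsMaxExpr dfsBestOf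
  congr 1
  apply congrArg (fun l => PySem.List.max? l fun y => y)
  rw [PySem.List.enumerate_eq_map_pyRange rs 0, List.map_map]
  simp only [PySem.List.len_eq, List.length_map]
  rw [PySem.List.pyRange_one, List.map_map, List.map_map]
  apply List.map_congr_left
  intro k hk
  simp only [List.mem_range] at hk
  have hk' : k < rs.length := by omega
  simp only [Function.comp_apply, zero_add, PySem.List.pyGetD_natCast]
  rw [List.getD_eq_getElem _ _ (by simpa using hk'), List.getD_eq_getElem _ _ hk']
  simp only [List.getElem_map]

-- after one expansion step the stack is mkFrames ++ (node expanded) :: rest, and its cost dropped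
lemma dfsExpandStack (sc : List Int) (t : Int) (b : Nat) (rest : List (Int × Int × Nat × Bool))
    (node : Int) :
    ((List.range sc.length).reverse).foldl
        (fun st i => (sc.getD i 0, t + 1 + (i : Int), b - 1, false) :: st)
        ((node, t, b, true) :: rest) =
      dfsMkFrames t (b - 1) sc 0 ++ (node, t, b, true) :: rest := by
  rw [dfsFoldRevCons (fun i => (sc.getD i 0, t + 1 + (i : Int), b - 1, false))]
  rw [dfsRangeMap_eq_mkFrames]

lemma dfsExpandCost (M : Nat) (sc : List Int) (t : Int) (bb : Nat)
    (rest : List (Int × Int × Nat × Bool)) (node : Int) (hn : sc.length ≤ M) :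
    dfsStackCost M (dfsMkFrames t bb sc 0 ++ (node, t, bb + 1, true) :: rest) + 1 ≤
      dfsStackCost M ((node, t, bb + 1, false) :: rest) := by
  rw [dfsStackCost_mkFrames, dfsStackCost_cons, dfsStackCost_cons]
  have h1 : sc.length * dfsSB M bb ≤ M * dfsSB M bb := Nat.mul_le_mul_right _ hn
  have h2 : 1 ≤ dfsSB M bb := dfsSB_pos M bb
  simp only [dfsFrameCost, if_pos, Bool.false_eq_true, if_false, dfsSB]
  have h3 : (M + 1) * dfsSB M bb = M * dfsSB M bb + dfsSB M bb := by ring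
  omega

lemma dfsFrameCost_false (M : Nat) (n : Int) (t : Int) (b : Nat) :
    dfsFrameCost M (n, t, b, false) = dfsSB M b := rfl

lemma dfsFrameCost_true (M : Nat) (n : Int) (t : Int) (b : Nat) :
    dfsFrameCost M (n, t, b, true) = 1 := rfl

lemma runB_mono (tree : List (Int × List Int)) (depths : List (Int × Int))
    (c : Nat) :
    ∀ (F₁ F₂ : Nat) (S : List (Int × Int × Nat × Bool)) (vals : List Int),
      dfsStackCost (dfsMaxChild tree) S ≤ c →
      dfsStackCost (dfsMaxChild tree) S ≤ F₁ →
      dfsStackCost (dfsMaxChild tree) S ≤ F₂ →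
      runB tree depths F₁ S vals = runB tree depths F₂ S vals := by
  induction c with
  | zero =>
    intro F₁ F₂ S vals hc _ _
    have := dfsStackCost_pos (dfsMaxChild tree) S
    omega
  | succ c ih =>
    intro F₁ F₂ S vals hc h1 h2
    have hp := dfsStackCost_pos (dfsMaxChild tree) S
    obtain ⟨a, rfl⟩ : ∃ a, F₁ = a + 1 := ⟨F₁ - 1, by omega⟩
    obtain ⟨b2, rfl⟩ : ∃ b2, F₂ = b2 + 1 := ⟨F₂ - 1, by omega⟩
    match S, hc, h1, h2 with
    | [], _, _, _ => rfl
    | (node, t, b, false) :: rest, hc, h1, h2 =>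
      rw [dfsStackCost_cons, dfsFrameCost_false] at hc h1 h2
      have hSB := dfsSB_pos (dfsMaxChild tree) b
      by_cases hb : b = 0
      · subst hb; simp only [runB, if_pos]
      · by_cases hch : dfsChildren tree node = []
        · simp only [runB, hch, if_pos, if_neg hb]
          exact ih _ _ _ _ (by omega) (by omega) (by omega)
        · simp only [runB, hch, if_neg hb, reduceIte]
          rw [dfsExpandStack]
          obtain ⟨bb, rfl⟩ : ∃ bb, b = bb + 1 := ⟨b - 1, by omega⟩
          have hn : (PySem.List.sorted (dfsChildren tree node)
              (fun x => dfsSortKey depths x) true).length ≤ dfsMaxChild tree := by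
            rw [PySem.List.length_sorted]
            exact dfsChildren_len_le tree node
          have hcost := dfsExpandCost (dfsMaxChild tree)
            (PySem.List.sorted (dfsChildren tree node) (fun x => dfsSortKey depths x) true)
            t bb rest node hn
          rw [dfsStackCost_cons, dfsFrameCost_false] at hcost
          simp only [Nat.add_sub_cancel]
          exact ih _ _ _ _ (by omega) (by omega) (by omega)
    | (node, t, b, true) :: rest, hc, h1, h2 =>
      rw [dfsStackCost_cons, dfsFrameCost_true] at hc h1 h2
      simp only [runB]
      exact ih _ _ _ _ (by omega) (by omega) (by omega)

lemma dfsSim (tree : List (Int × List Int)) (depths : List (Int × Int)) (f : Nat) :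
    ∀ (v t : Int) (S : List (Int × Int × Nat × Bool)) (vals : List Int) (F : Nat),
      dfsSB (dfsMaxChild tree) f + dfsStackCost (dfsMaxChild tree) S ≤ F →
      runB tree depths F ((v, t, f, false) :: S) vals =
        match dfsO tree depths f v t with
        | none => none
        | some r => runB tree depths (dfsStackCost (dfsMaxChild tree) S) S (vals ++ [r]) := by
  induction f with
  | zero =>
    intro v t S vals F hF
    have h1 := dfsSB_pos (dfsMaxChild tree) 0
    have h2 := dfsStackCost_pos (dfsMaxChild tree) S
    obtain ⟨a, rfl⟩ : ∃ a, F = a + 1 := ⟨F - 1, by omega⟩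
    simp only [runB, dfsO, if_pos]
  | succ f ih =>
    intro v t S vals F hF
    have hSB1 := dfsSB_pos (dfsMaxChild tree) (f + 1)
    have hSBf := dfsSB_pos (dfsMaxChild tree) f
    have hcp := dfsStackCost_pos (dfsMaxChild tree) S
    obtain ⟨a, rfl⟩ : ∃ a, F = a + 1 := ⟨F - 1, by omega⟩
    rw [dfsO_succ]
    by_cases hch : dfsChildren tree v = []
    · simp only [runB, hch, if_pos, Nat.succ_ne_zero, reduceIte]
      exact runB_mono tree depths a a (dfsStackCost (dfsMaxChild tree) S) S (vals ++ [0])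
        (by omega) (by omega) (by omega)
    · -- internal node: one expansion step, then the child loop
      simp only [runB, hch, Nat.succ_ne_zero, reduceIte]
      rw [dfsExpandStack]
      simp only [Nat.add_sub_cancel]
      have hscl : (PySem.List.sorted (dfsChildren tree v) (fun x => dfsSortKey depths x)
          true).length = (dfsChildren tree v).length := PySem.List.length_sorted _ _ _
      have hscM : (PySem.List.sorted (dfsChildren tree v) (fun x => dfsSortKey depths x)
          true).length ≤ dfsMaxChild tree := by
        rw [hscl]; exact dfsChildren_len_le tree v
      have hcost1 : dfsStackCost (dfsMaxChild tree) ((v, t, f + 1, true) :: S) =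
          1 + dfsStackCost (dfsMaxChild tree) S := by
        rw [dfsStackCost_cons, dfsFrameCost_true]
      -- the inner loop invariant, by induction over the remaining children
      have inner : ∀ (cs : List Int) (ts0 vals' : List Int) (F' : Nat),
          cs.length * dfsSB (dfsMaxChild tree) f +
              dfsStackCost (dfsMaxChild tree) ((v, t, f + 1, true) :: S) ≤ F' →
          (dfsFoldA tree depths f t cs (some ts0) = none ∧
            runB tree depths F'
              (dfsMkFrames t f cs ts0.length ++ (v, t, f + 1, true) :: S) vals' = none)
          ∨ ∃ rs : List Int, rs.length = cs.length ∧
              dfsFoldA tree depths f t cs (some ts0) =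
                some (ts0 ++ rs.map (fun r => r + 1)) ∧
              runB tree depths F'
                  (dfsMkFrames t f cs ts0.length ++ (v, t, f + 1, true) :: S) vals' =
                runB tree depths (dfsStackCost (dfsMaxChild tree) ((v, t, f + 1, true) :: S))
                  ((v, t, f + 1, true) :: S) (vals' ++ rs) := by
        intro cs
        induction cs with
        | nil =>
          intro ts0 vals' F' hF'
          simp only [List.length_nil, Nat.zero_mul, Nat.zero_add] at hF'
          right
          refine ⟨[], rfl, by simp [dfsFoldA_nil], ?_⟩
          simp only [dfsMkFrames, List.nil_append, List.append_nil]
          exact runB_mono tree depths F' F'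
            (dfsStackCost (dfsMaxChild tree) ((v, t, f + 1, true) :: S))
            ((v, t, f + 1, true) :: S) vals' (by omega) (by omega) (by omega)
        | cons c cs ihc =>
          intro ts0 vals' F' hF'
          rw [dfsFoldA_cons]
          simp only [Option.bind_some]
          simp only [dfsMkFrames, List.cons_append]
          have hrec := ih c (t + 1 + (ts0.length : Int))
            (dfsMkFrames t f cs (ts0.length + 1) ++ (v, t, f + 1, true) :: S) vals' F'
            (by
              rw [dfsStackCost_mkFrames]
              rw [List.length_cons] at hF'
              have hmul : (cs.length + 1) * dfsSB (dfsMaxChild tree) f =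
                  cs.length * dfsSB (dfsMaxChild tree) f + dfsSB (dfsMaxChild tree) f := by ring
              omega)
          rw [hrec]
          cases hc : dfsO tree depths f c (t + 1 + (ts0.length : Int)) with
          | none =>
            left
            exact ⟨by simp [dfsFoldA_none], rfl⟩
          | some r =>
            simp only [Option.map_some]
            have hstep := ihc (ts0 ++ [r + 1]) (vals' ++ [r])
              (dfsStackCost (dfsMaxChild tree)
                (dfsMkFrames t f cs (ts0.length + 1) ++ (v, t, f + 1, true) :: S))
              (by rw [dfsStackCost_mkFrames])
            rw [List.length_append] at hstep
            simp only [List.length_cons, List.length_nil, Nat.zero_add] at hstep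
            rcases hstep with ⟨hfold, hrun⟩ | ⟨rs, hlen, hfold, hrun⟩
            · left
              exact ⟨hfold, hrun⟩
            · right
              refine ⟨r :: rs, by simp [hlen], ?_, ?_⟩
              · rw [hfold]
                simp
              · rw [hrun]
                simp
        -- end inner
      have hinner := inner
        (PySem.List.sorted (dfsChildren tree v) (fun x => dfsSortKey depths x) true) [] vals a
        (by
          have h3 : (dfsMaxChild tree + 1) * dfsSB (dfsMaxChild tree) f =
              dfsMaxChild tree * dfsSB (dfsMaxChild tree) f + dfsSB (dfsMaxChild tree) f := by
            ring
          have h4 : (PySem.List.sorted (dfsChildren tree v) (fun x => dfsSortKey depths x)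
                true).length * dfsSB (dfsMaxChild tree) f ≤
              dfsMaxChild tree * dfsSB (dfsMaxChild tree) f :=
            Nat.mul_le_mul_right _ hscM
          simp only [dfsSB] at hF
          omega)
      simp only [List.length_nil] at hinner
      rcases hinner with ⟨hfold, hrun⟩ | ⟨rs, hlen, hfold, hrun⟩
      · rw [hrun, hfold]
      · rw [hrun, hfold]
        simp only [List.nil_append]
        -- reduce the expanded frame: pop the n child results and push their best
        rw [hcost1]
        have hn : rs.length = (dfsChildren tree v).length := by rw [hlen, hscl]
        have hone : 1 + dfsStackCost (dfsMaxChild tree) S =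
            dfsStackCost (dfsMaxChild tree) S + 1 := by omega
        rw [hone]
        simp only [runB]
        have hlen2 : (vals ++ rs).length - (dfsChildren tree v).length = vals.length := by
          simp [hn]
        rw [hlen2, List.drop_left, List.take_left]
        rw [dfsMaxEq]
        simp

-- ===== VERDICT (by name: the statement is the Claim_ definition above) =====
theorem dfs_spec : Claim_equal_dfs := by
  intro v tree dp arrival_time current_time depths _ _
  unfold Spec_dfs dfs dfs_alt
  have h := dfsSim tree depths (tree.length + 1) v current_time [] []
      (dfsSB (dfsMaxChild tree) (tree.length + 1) + 1)
      (by simp [dfsStackCost])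
  rw [h]
  cases hx : dfsO tree depths (tree.length + 1) v current_time with
  | none => simp
  | some r => simp [dfsStackCost, runB]
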